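-- pv_equiv track=rewrite | github.com/wawr2k/macrorec | add_skill_options_to_tasks.py | update_skill_calls
-- ===== SOURCE A (Python) =====
-- def update_skill_calls(content):
--     """Update existing use_skill calls and add use_skill_2 calls in combat loops"""
--     lines = content.split('\n')
--     new_lines = []
--
--     for i, line in enumerate(lines):
--         # Look for use_skill calls (both self.skill_time and _skill_time patterns)
--         if '= self.use_skill(' in line or '_skill_time = self.use_skill(' in line:
--             new_lines.append(line)
--             # Check if use_skill_2 is called on next few lines
--             has_skill_2 = False
--             for j in range(i + 1, min(i + 5, len(lines))):
--                 if 'use_skill_2' in lines[j]: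
--                     has_skill_2 = True
--                     break
--
--             if not has_skill_2:
--                 # Add use_skill_2 call after use_skill
--                 indent = len(line) - len(line.lstrip())
--
--                 # Determine variable name pattern
--                 if 'self.skill_time' in line:
--                     skill_2_var = 'self.skill_time_2'
--                 elif '_skill_time' in line:
--                     skill_2_var = '_skill_time_2'
--                 else:
--                     skill_2_var = 'self.skill_time_2'
--
--                 new_lines.append(f"{' ' * indent}{skill_2_var} = self.use_skill_2({skill_2_var})")
--             continue
--
--         new_lines.append(line)
--
--     return '\n'.join(new_lines)
-- ===== SOURCE B (Python) =====
-- def _skill2_line(line):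
--     indent = len(line) - len(line.lstrip())
--     if 'self.skill_time' in line:
--         var = 'self.skill_time_2'
--     elif '_skill_time' in line:
--         var = '_skill_time_2'
--     else:
--         var = 'self.skill_time_2'
--     return ' ' * indent + var + ' = self.use_skill_2(' + var + ')'
--
--
-- def _expand(i, line, flagged):
--     # '_skill_time = self.use_skill(' contains '= self.use_skill(',
--     # so A's two-part test collapses to one containment check.
--     if '= self.use_skill(' not in line:
--         return [line]
--     if any(flagged[i + 1:i + 5]):
--         return [line]
--     return [line, _skill2_line(line)]
--
--
-- def update_skill_calls(content):
--     """Update existing use_skill calls and add use_skill_2 calls in combat loops"""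
--     lines = content.split('\n')
--     flagged = ['use_skill_2' in ln for ln in lines]
--     return '\n'.join(seg for i, line in enumerate(lines)
--                      for seg in _expand(i, line, flagged))
-- ===== Notes on version B (the rewrite author's own statement) =====
-- stated objective: alternative
-- what changed: B first builds a per-line boolean table of which original lines contain the skip marker, collapses A's redundant two-substring test to the single containment it implies, and produces the output in a separate pass as a flat expansion of per-line segments that consults the table over the 4-line lookahead window, instead of A's single loop with an inner index rescan of the following lines.
import Mathlib
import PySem

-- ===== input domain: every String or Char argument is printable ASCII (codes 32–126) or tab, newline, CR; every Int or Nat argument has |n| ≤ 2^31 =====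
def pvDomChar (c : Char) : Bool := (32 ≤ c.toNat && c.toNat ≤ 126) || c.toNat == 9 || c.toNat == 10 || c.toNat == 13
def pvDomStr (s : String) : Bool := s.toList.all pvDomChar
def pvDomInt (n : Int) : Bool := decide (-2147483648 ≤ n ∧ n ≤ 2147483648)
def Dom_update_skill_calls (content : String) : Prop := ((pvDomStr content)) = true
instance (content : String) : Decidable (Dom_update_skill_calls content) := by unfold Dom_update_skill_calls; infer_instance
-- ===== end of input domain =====

-- B precomputes a per-line marker table and emits the output as a flat expansion of
-- per-line segments (alternative decomposition; same cost).

-- ===== PORT A =====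
def update_skill_calls (content : String) : String :=
  let lines := (PySem.Str.split? content "\n").getD []
  let new_lines := (PySem.List.enumerate lines 0).foldl (fun acc p =>
    let i := p.1
    let line := p.2
    if PySem.Str.isIn "= self.use_skill(" line || PySem.Str.isIn "_skill_time = self.use_skill(" line then
      let acc1 := acc ++ [line]
      -- flag-with-break loop over range(i+1, min(i+5, len(lines))) = .any over that range
      let has2 := (PySem.List.pyRange (i + 1) (min (i + 5) (lines.length : Int)) 1).any
        (fun j => PySem.Str.isIn "use_skill_2" (PySem.List.pyGetD lines j ""))
      if !has2 then
        let indent := PySem.Str.len line - PySem.Str.len (PySem.Str.lstrip line)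
        let var := if PySem.Str.isIn "self.skill_time" line then "self.skill_time_2"
          else if PySem.Str.isIn "_skill_time" line then "_skill_time_2"
          else "self.skill_time_2"
        acc1 ++ [String.ofList (List.replicate indent.toNat ' ') ++ var ++ " = self.use_skill_2(" ++ var ++ ")"]
      else acc1
    else acc ++ [line]) []
  PySem.Str.join "\n" new_lines

-- ===== PORT B =====
def skill2Line (line : String) : String :=
  let indent := PySem.Str.len line - PySem.Str.len (PySem.Str.lstrip line)
  let var := if PySem.Str.isIn "self.skill_time" line then "self.skill_time_2"
    else if PySem.Str.isIn "_skill_time" line then "_skill_time_2"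
    else "self.skill_time_2"
  String.ofList (List.replicate indent.toNat ' ') ++ var ++ " = self.use_skill_2(" ++ var ++ ")"

def expandLine (i : Int) (line : String) (flagged : List Bool) : List String :=
  if !(PySem.Str.isIn "= self.use_skill(" line) then [line]
  else if (PySem.List.slice flagged (some (i + 1)) (some (i + 5))).any id then [line]
  else [line, skill2Line line]

def update_skill_calls_alt (content : String) : String :=
  let lines := (PySem.Str.split? content "\n").getD []
  let flagged := lines.map (fun ln => PySem.Str.isIn "use_skill_2" ln)
  PySem.Str.join "\n" ((PySem.List.enumerate lines 0).flatMap (fun p => expandLine p.1 p.2 flagged))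

-- ===== PRECONDITION & SPEC =====
def Spec_update_skill_calls (content : String) (out : String) : Prop := out = update_skill_calls_alt content
instance (content : String) (out : String) : Decidable (Spec_update_skill_calls content out) := by unfold Spec_update_skill_calls; infer_instance

-- ===== CLAIM (what is proved, stated in full; the proofs are below) =====
def Claim_equal_update_skill_calls : Prop := ∀ (content : String), Dom_update_skill_calls content → Spec_update_skill_calls content (update_skill_calls content)

-- ===== LEMMAS AND PROOFS =====

-- the per-line segment A's loop body appends (proved below to be what the body does)
def segA (lines : List String) (p : Int × String) : List String :=
  if PySem.Str.isIn "= self.use_skill(" p.2 || PySem.Str.isIn "_skill_time = self.use_skill(" p.2 then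
    let has2 := (PySem.List.pyRange (p.1 + 1) (min (p.1 + 5) (lines.length : Int)) 1).any
      (fun j => PySem.Str.isIn "use_skill_2" (PySem.List.pyGetD lines j ""))
    if !has2 then [p.2, skill2Line p.2] else [p.2]
  else [p.2]

theorem isIn_sub (line : String)
    (h : PySem.Str.isIn "_skill_time = self.use_skill(" line = true) :
    PySem.Str.isIn "= self.use_skill(" line = true := by
  rw [PySem.Str.isIn_iff_infix] at h ⊢
  exact List.IsInfix.trans (by decide) h

theorem A_eq_flatMap (lines : List String) :
    (PySem.List.enumerate lines 0).foldl (fun acc p =>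
      let i := p.1
      let line := p.2
      if PySem.Str.isIn "= self.use_skill(" line || PySem.Str.isIn "_skill_time = self.use_skill(" line then
        let acc1 := acc ++ [line]
        let has2 := (PySem.List.pyRange (i + 1) (min (i + 5) (lines.length : Int)) 1).any
          (fun j => PySem.Str.isIn "use_skill_2" (PySem.List.pyGetD lines j ""))
        if !has2 then
          let indent := PySem.Str.len line - PySem.Str.len (PySem.Str.lstrip line)
          let var := if PySem.Str.isIn "self.skill_time" line then "self.skill_time_2"
            else if PySem.Str.isIn "_skill_time" line then "_skill_time_2"
            else "self.skill_time_2"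
          acc1 ++ [String.ofList (List.replicate indent.toNat ' ') ++ var ++ " = self.use_skill_2(" ++ var ++ ")"]
        else acc1
      else acc ++ [line]) [] = (PySem.List.enumerate lines 0).flatMap (segA lines) := by
  have hb : (fun (acc : List String) (p : Int × String) =>
      let i := p.1
      let line := p.2
      if PySem.Str.isIn "= self.use_skill(" line || PySem.Str.isIn "_skill_time = self.use_skill(" line then
        let acc1 := acc ++ [line]
        let has2 := (PySem.List.pyRange (i + 1) (min (i + 5) (lines.length : Int)) 1).any
          (fun j => PySem.Str.isIn "use_skill_2" (PySem.List.pyGetD lines j ""))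
        if !has2 then
          let indent := PySem.Str.len line - PySem.Str.len (PySem.Str.lstrip line)
          let var := if PySem.Str.isIn "self.skill_time" line then "self.skill_time_2"
            else if PySem.Str.isIn "_skill_time" line then "_skill_time_2"
            else "self.skill_time_2"
          acc1 ++ [String.ofList (List.replicate indent.toNat ' ') ++ var ++ " = self.use_skill_2(" ++ var ++ ")"]
        else acc1
      else acc ++ [line]) = fun acc p => acc ++ segA lines p := by
    funext acc p
    simp only [segA, skill2Line]
    split_ifs <;> simp [List.append_assoc]
  rw [hb, PySem.List.foldl_append_eq_flatMap]
  simp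

theorem has_eq (lines : List String) (f : String → Bool) (k : Nat) :
    (PySem.List.pyRange ((k : Int) + 1) (min ((k : Int) + 5) (lines.length : Int)) 1).any
      (fun j => f (PySem.List.pyGetD lines j "")) =
    (PySem.List.slice (lines.map f) (some ((k : Int) + 1)) (some ((k : Int) + 5))).any id := by
  have h1 : (k : Int) + 1 = ((k + 1 : Nat) : Int) := by push_cast; ring
  have h5 : (k : Int) + 5 = ((k + 5 : Nat) : Int) := by push_cast; ring
  rw [h1, h5, PySem.List.slice_natCast, ← List.map_drop, ← List.map_take, List.any_map]
  rw [PySem.List.pyRange_one, List.any_map]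
  rw [Bool.eq_iff_iff]
  simp only [List.any_eq_true, List.mem_range, Function.comp, id]
  constructor
  · rintro ⟨t, ht, hf⟩
    have hn : k + 1 + t < lines.length := by omega
    have hcast : ((k + 1 : Nat) : Int) + (t : Int) = ((k + 1 + t : Nat) : Int) := by push_cast; ring
    rw [hcast, PySem.List.pyGetD_natCast, List.getD_eq_getElem lines "" hn] at hf
    have hlen : t < (List.take (k + 5 - (k + 1)) (List.drop (k + 1) lines)).length := by
      simp [List.length_take, List.length_drop]; omega
    refine ⟨_, List.getElem_mem hlen, ?_⟩
    have he : (List.take (k + 5 - (k + 1)) (List.drop (k + 1) lines))[t]'hlen = lines[k + 1 + t]'hn := by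
      rw [List.getElem_take, List.getElem_drop]
    rw [he]; exact hf
  · rintro ⟨x, hx, hf⟩
    obtain ⟨t, htlen, rfl⟩ := List.mem_iff_getElem.mp hx
    have h4 : t < k + 5 - (k + 1) ∧ k + 1 + t < lines.length := by
      have := htlen; simp [List.length_take, List.length_drop] at this; omega
    refine ⟨t, by omega, ?_⟩
    have hcast : ((k + 1 : Nat) : Int) + (t : Int) = ((k + 1 + t : Nat) : Int) := by push_cast; ring
    rw [hcast, PySem.List.pyGetD_natCast, List.getD_eq_getElem lines "" h4.2]
    rw [List.getElem_take, List.getElem_drop] at hf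
    exact hf

theorem seg_eq (lines : List String) (k : Nat) (line : String) :
    segA lines ((k : Int), line) =
      expandLine (k : Int) line (lines.map (fun ln => PySem.Str.isIn "use_skill_2" ln)) := by
  unfold segA expandLine
  dsimp only
  cases hc : PySem.Str.isIn "= self.use_skill(" line
  · have hc2 : PySem.Str.isIn "_skill_time = self.use_skill(" line = false := by
      cases h2 : PySem.Str.isIn "_skill_time = self.use_skill(" line
      · rfl
      · exact absurd (isIn_sub line h2) (by rw [hc]; exact Bool.false_ne_true)
    rw [hc2]
    simp
  · simp only [Bool.true_or, Bool.not_true, if_true]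
    rw [has_eq lines (fun ln => PySem.Str.isIn "use_skill_2" ln) k]
    cases hb : (PySem.List.slice (lines.map fun ln => PySem.Str.isIn "use_skill_2" ln)
        (some ((k : Int) + 1)) (some ((k : Int) + 5))).any id <;> simp

theorem flatMap_congr_mem {α β : Type} (l : List α) (f g : α → List β)
    (h : ∀ x ∈ l, f x = g x) : l.flatMap f = l.flatMap g := by
  induction l with
  | nil => rfl
  | cons a l ih =>
    simp only [List.flatMap_cons, h a (by simp), ih (fun x hx => h x (by simp [hx]))]

-- ===== VERDICT (by name: the statement is the Claim_ definition above) =====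
theorem update_skill_calls_spec : Claim_equal_update_skill_calls := by
  intro content _
  show update_skill_calls content = update_skill_calls_alt content
  unfold update_skill_calls update_skill_calls_alt
  dsimp only
  rw [A_eq_flatMap]
  refine congrArg (PySem.Str.join "\n") (flatMap_congr_mem _ _ _ ?_)
  rintro p hp
  rw [PySem.List.mem_enumerate_iff] at hp
  obtain ⟨k, hk, rfl⟩ := hp
  simpa using seg_eq ((PySem.Str.split? content "\n").getD []) k
    (((PySem.Str.split? content "\n").getD [])[k])
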